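-- pv_equiv track=rewrite | github.com/Ghostkey316/theloopbreaker.com | vaultfire/identity/layer.py | _merge_identifiers
-- ===== SOURCE A (Python) =====
-- from typing import Mapping, MutableMapping, Sequence
--
-- def _merge_identifiers(
--
--     existing: Mapping[str, tuple[str, ...]] | None,
--     incoming: Mapping[str, tuple[str, ...]],
-- ) -> Mapping[str, tuple[str, ...]]:
--     merged: MutableMapping[str, set[str]] = {
--         key: set(values) for key, values in (existing or {}).items()
--     }
--     for key, values in incoming.items():
--         merged.setdefault(key, set()).update(values)
--     return {key: tuple(sorted(values)) for key, values in merged.items() if values}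
-- ===== SOURCE B (Python) =====
-- from typing import Mapping
--
--
-- def _merge_identifiers(
--     existing: Mapping[str, tuple[str, ...]] | None,
--     incoming: Mapping[str, tuple[str, ...]],
-- ) -> Mapping[str, tuple[str, ...]]:
--     # Sort-then-scan: flatten both mappings into flat (key-index, value) pairs,
--     # sort them once globally, then one linear scan groups consecutive pairs per
--     # key and drops consecutive duplicate values.  No per-key sets are built.
--     order: dict[str, int] = {}  # key -> first-seen index
--     pairs: list[tuple[int, str]] = []
--     for mapping in (existing or {}, incoming):
--         for key, values in mapping.items():
--             idx = order.setdefault(key, len(order))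
--             for value in values:
--                 pairs.append((idx, value))
--     pairs.sort()
--     names = list(order)  # index -> key
--     merged: dict[str, tuple[str, ...]] = {}
--     for idx, value in pairs:
--         key = names[idx]
--         prev = merged.get(key)
--         if prev is None:
--             merged[key] = (value,)
--         elif prev[-1] != value:
--             merged[key] = prev + (value,)
--     return merged
-- ===== Notes on version B (the rewrite author's own statement) =====
-- stated objective: alternative
-- what changed: B replaces A's per-key set accumulation (dict of sets mutated via setdefault/update, then a per-key sort) with a sort-then-scan algorithm: it flattens both mappings into a flat list of (key-index, value) pairs, sorts that list once globally, and a single linear scan groups consecutive pairs per key while skipping consecutive duplicate values; no sets or per-key sorts are used.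
import Mathlib
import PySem

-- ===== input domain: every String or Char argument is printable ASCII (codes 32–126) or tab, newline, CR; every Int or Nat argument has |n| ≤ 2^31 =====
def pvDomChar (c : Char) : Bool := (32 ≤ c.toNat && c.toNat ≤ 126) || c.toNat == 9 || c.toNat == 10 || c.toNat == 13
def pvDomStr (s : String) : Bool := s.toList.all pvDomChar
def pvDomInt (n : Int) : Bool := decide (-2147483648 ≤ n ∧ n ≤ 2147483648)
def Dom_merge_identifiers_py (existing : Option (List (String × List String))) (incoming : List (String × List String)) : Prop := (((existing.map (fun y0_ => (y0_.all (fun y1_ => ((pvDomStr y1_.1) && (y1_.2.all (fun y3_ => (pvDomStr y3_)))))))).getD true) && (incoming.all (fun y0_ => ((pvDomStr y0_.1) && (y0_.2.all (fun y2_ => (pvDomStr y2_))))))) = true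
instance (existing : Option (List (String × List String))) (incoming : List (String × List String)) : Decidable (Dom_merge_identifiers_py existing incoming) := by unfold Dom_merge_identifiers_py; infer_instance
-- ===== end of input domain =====

-- B replaces A's per-key set accumulation with a sort-then-scan algorithm (flatten both
-- mappings into flat (key-index, value) pairs, one global sort, one linear grouping scan);
-- same asymptotic cost, genuinely different algorithm (objective: alternative).
-- Both dict arguments are modelled as association lists read through PySem.Dict.ofList
-- (Python dict semantics: first position, last value wins on duplicate keys).

-- ===== PORT A =====
def merge_identifiers_py (existing : Option (List (String × List String))) (incoming : List (String × List String)) : List (String × List String) :=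
  let exd : PySem.Dict String (List String) := PySem.Dict.ofList (existing.getD [])
  let ind : PySem.Dict String (List String) := PySem.Dict.ofList incoming
  -- merged = {key: set(values) for key, values in (existing or {}).items()}
  let merged0 : PySem.Dict String (PySem.Set String) :=
    PySem.Dict.mk (exd.items.map (fun kv => (kv.1, PySem.Set.ofList kv.2)))
  -- for key, values in incoming.items(): merged.setdefault(key, set()).update(values)
  let merged := ind.items.foldl
    (fun d kv => d.modify kv.1 PySem.Set.empty (fun s => PySem.Set.update s kv.2)) merged0
  -- {key: tuple(sorted(values)) for key, values in merged.items() if values}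
  -- (merged's keys are distinct, so the comprehension's dict is exactly this append loop)
  merged.items.foldl
    (fun acc kv => if !kv.2.isEmpty then acc ++ [(kv.1, PySem.List.sorted kv.2 (fun x => x))] else acc) []

-- ===== PORT B =====
-- one iteration of B's flattening loop: idx = order.setdefault(key, len(order));
-- pairs += [(idx, v) for v in values].  order maps each key to its first-seen position,
-- so it is modelled as the list of its keys (st.1) with order[k] = index of k in st.1 (exact).
def bStep (st : List String × List (Nat × String)) (kv : String × List String) : List String × List (Nat × String) :=
  match PySem.List.index? st.1 kv.1 with
  | some i => (st.1, st.2 ++ kv.2.map (fun v => (i, v)))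
  | none => (st.1 ++ [kv.1], st.2 ++ kv.2.map (fun v => (st.1.length, v)))

-- one iteration of B's scan loop: key = names[idx]; prev = merged.get(key);
-- insert (value,), or append value when prev[-1] != value
def bScan (names : List String) (merged : PySem.Dict String (List String)) (p : Nat × String) : PySem.Dict String (List String) :=
  let key := names.getD p.1 ""   -- names[idx]; idx < len(names) always, so getD is exact
  match merged.get? key with
  | none => merged.insert key [p.2]
  | some prev => if PySem.List.pyGet? prev (-1) ≠ some p.2 then merged.insert key (prev ++ [p.2]) else merged

def merge_identifiers_py_alt (existing : Option (List (String × List String))) (incoming : List (String × List String)) : List (String × List String) :=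
  let exd : PySem.Dict String (List String) := PySem.Dict.ofList (existing.getD [])
  let ind : PySem.Dict String (List String) := PySem.Dict.ofList incoming
  -- for mapping in (existing or {}, incoming): for key, values in mapping.items(): …
  let st := (exd.items ++ ind.items).foldl bStep ([], [])
  -- pairs.sort()   (tuples compare lexicographically: first component, then second)
  let pairs := PySem.List.sorted2 st.2 (fun p => p.1) (fun p => p.2)
  -- names = list(order); merged = {}; for idx, value in pairs: …
  (pairs.foldl (bScan st.1) PySem.Dict.empty).items

-- ===== PRECONDITION & SPEC =====
def Spec_merge_identifiers_py (existing : Option (List (String × List String))) (incoming : List (String × List String)) (out : List (String × List String)) : Prop := out = merge_identifiers_py_alt existing incoming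
instance (existing : Option (List (String × List String))) (incoming : List (String × List String)) (out : List (String × List String)) : Decidable (Spec_merge_identifiers_py existing incoming out) := by unfold Spec_merge_identifiers_py; infer_instance

-- ===== CLAIM (what is proved, stated in full; the proofs are below) =====
def Claim_equal_merge_identifiers_py : Prop := ∀ (existing : Option (List (String × List String))) (incoming : List (String × List String)), Dom_merge_identifiers_py existing incoming → Spec_merge_identifiers_py existing incoming (merge_identifiers_py existing incoming)

-- ===== LEMMAS AND PROOFS =====

-- proof-side abbreviations: the merged key list, the per-key value occurrences, the per-key set
def pvKeys (exd ind : PySem.Dict String (List String)) : List String :=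
  PySem.Set.ofList (exd.keys ++ ind.keys)

def pvVs (ps : List (String × List String)) (k : String) : List String :=
  (ps.filter (fun kv => kv.1 == k)).flatMap (fun kv => kv.2)

def pvV (exd ind : PySem.Dict String (List String)) (k : String) : PySem.Set String :=
  PySem.Set.union (PySem.Set.ofList (exd.getD k [])) (PySem.Set.ofList (ind.getD k []))

def posIn (names : List String) (k : String) : Nat := (PySem.List.index? names k).getD 0

-- ---------- generic set lemmas (shared by both sides) ----------

theorem set_update_add {α : Type} [BEq α] [LawfulBEq α] (s t : PySem.Set α) (x : α) :
    PySem.Set.update s (PySem.Set.add t x) = PySem.Set.add (PySem.Set.update s t) x := by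
  by_cases hx : x ∈ t
  · have h1 : PySem.Set.add t x = t := PySem.Set.add_of_mem hx
    have h2 : PySem.Set.add (PySem.Set.update s t) x = PySem.Set.update s t := by
      simp [PySem.Set.add, hx]
    rw [h1, h2]
  · have h1 : PySem.Set.add t x = t ++ [x] := PySem.Set.add_of_not_mem hx
    rw [h1]
    simp [PySem.Set.update, List.foldl_append, PySem.Set.add]

theorem set_update_ofList {α : Type} [BEq α] [LawfulBEq α] (s : PySem.Set α) (xs : List α) :
    PySem.Set.update s (PySem.Set.ofList xs) = PySem.Set.update s xs := by
  suffices h : ∀ (xs : List α) (t s : PySem.Set α),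
      PySem.Set.update s (List.foldl PySem.Set.add t xs) = PySem.Set.update (PySem.Set.update s t) xs by
    have := h xs PySem.Set.empty s
    simpa [PySem.Set.ofList, PySem.Set.update, PySem.Set.empty] using this
  intro xs
  induction xs with
  | nil => intro t s; simp [PySem.Set.update]
  | cons x xs ih =>
    intro t s
    simp only [List.foldl_cons]
    rw [ih (PySem.Set.add t x) s, set_update_add]
    simp [PySem.Set.update]

theorem set_ofList_eq_nil_iff {α : Type} [BEq α] [LawfulBEq α] (xs : List α) :
    PySem.Set.ofList xs = [] ↔ xs = [] := by
  cases xs with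
  | nil => simp [PySem.Set.ofList, PySem.Set.empty]
  | cons x xs =>
    simp only [PySem.Set.ofList_cons]
    constructor
    · intro h; cases h
    · intro h; cases h

-- ---------- A-side lemmas (characterising A's merged dict) ----------

-- get? on a dict whose items are value-mapped
theorem get?_mk_map {κ ν ν' : Type} [BEq κ] (l : List (κ × ν)) (g : ν → ν') (k : κ) :
    (PySem.Dict.mk (l.map (fun kv => (kv.1, g kv.2)))).get? k
      = ((PySem.Dict.mk l).get? k).map g := by
  induction l with
  | nil => simp [PySem.Dict.get?]
  | cons p l ih =>
    by_cases h : p.1 == k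
    · simp [PySem.Dict.get?, List.find?, h]
    · simpa [PySem.Dict.get?, List.find?, h] using ih

-- a key not occurring in ps is untouched by A's merge fold
theorem get?_foldl_modify_not_mem {κ ν : Type} [BEq κ] [LawfulBEq κ] (f : κ × List κ → ν → ν) (d0 : ν) :
    ∀ (ps : List (κ × List κ)) (d : PySem.Dict κ ν) (k : κ), k ∉ ps.map Prod.fst →
      (ps.foldl (fun d kv => d.modify kv.1 d0 (f kv)) d).get? k = d.get? k := by
  intro ps
  induction ps with
  | nil => intro d k _; rfl
  | cons p ps ih =>
    intro d k hk
    simp only [List.map_cons, List.mem_cons, not_or] at hk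
    simp only [List.foldl_cons]
    rw [ih _ k hk.2, PySem.Dict.modify, PySem.Dict.get?_insert_of_ne _ _ hk.1]

-- characterisation of A's merge fold: get? after folding the update step over ps
theorem get?_foldl_modify_update {κ : Type} [BEq κ] [LawfulBEq κ] :
    ∀ (ps : List (κ × List κ)) (d : PySem.Dict κ (PySem.Set κ)) (k : κ), (ps.map Prod.fst).Nodup →
      (ps.foldl (fun d kv => d.modify kv.1 PySem.Set.empty (fun s => PySem.Set.update s kv.2)) d).get? k
        = (match ps.find? (fun p => p.1 == k) with
           | some p => some (PySem.Set.update (d.getD k PySem.Set.empty) p.2)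
           | none => d.get? k) := by
  intro ps
  induction ps with
  | nil => intro d k _; rfl
  | cons p ps ih =>
    intro d k hnd
    simp only [List.map_cons, List.nodup_cons] at hnd
    by_cases h : p.1 == k
    · have hk : k = p.1 := (LawfulBEq.eq_of_beq h).symm
      subst hk
      simp only [List.foldl_cons]
      rw [get?_foldl_modify_not_mem _ _ ps _ p.1 hnd.1, PySem.Dict.modify,
        PySem.Dict.get?_insert_self]
      simp
    · have hne : k ≠ p.1 := fun he => h (by simp [he])
      simp only [List.foldl_cons]
      rw [ih _ k hnd.2]
      have hget : (d.modify p.1 ([] : PySem.Set κ) (fun s => PySem.Set.update s p.2)).get? k = d.get? k := by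
        rw [PySem.Dict.modify, PySem.Dict.get?_insert_of_ne _ _ hne]
      cases hf : ps.find? (fun q => q.1 == k) with
      | some q => simp [h, hf, PySem.Dict.getD, hget]
      | none => simp [h, hf, hget]

-- an association list with distinct keys is the map of its key list through its own lookup
theorem items_eq_map_keys' {κ ν : Type} [BEq κ] [LawfulBEq κ] (l : List (κ × ν)) (d0 : ν)
    (h : (l.map Prod.fst).Nodup) :
    l = (l.map Prod.fst).map (fun k => (k, (PySem.Dict.mk l).getD k d0)) := by
  have key : ∀ kv ∈ l, (PySem.Dict.mk l).get? kv.1 = some kv.2 := by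
    induction l with
    | nil => simp
    | cons p l ih =>
      intro kv hkv
      simp only [List.map_cons, List.nodup_cons] at h
      rcases List.mem_cons.1 hkv with rfl | hmem
      · simp [PySem.Dict.get?, List.find?]
      · have hne : ¬(p.1 == kv.1) := by
          intro hb
          exact h.1 (LawfulBEq.eq_of_beq hb ▸ List.mem_map_of_mem hmem)
        simpa [PySem.Dict.get?, List.find?, hne] using ih h.2 kv hmem
  rw [List.map_map]
  conv_lhs => rw [← List.map_id l]
  apply List.map_congr_left
  intro kv hkv
  simp [PySem.Dict.getD, key kv hkv]

-- A equals the canonical filter-map over the merged key list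
theorem A_eq_canon (existing : Option (List (String × List String))) (incoming : List (String × List String)) :
    merge_identifiers_py existing incoming
      = ((pvKeys (PySem.Dict.ofList (existing.getD [])) (PySem.Dict.ofList incoming)).filter
          (fun k => !(pvV (PySem.Dict.ofList (existing.getD [])) (PySem.Dict.ofList incoming) k).isEmpty)).map
          (fun k => (k, PySem.List.sorted (pvV (PySem.Dict.ofList (existing.getD [])) (PySem.Dict.ofList incoming) k) (fun x => x))) := by
  unfold merge_identifiers_py
  set exd : PySem.Dict String (List String) := PySem.Dict.ofList (existing.getD []) with hexd
  set ind : PySem.Dict String (List String) := PySem.Dict.ofList incoming with hind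
  set M := (ind.items.foldl
    (fun d kv => d.modify kv.1 PySem.Set.empty (fun s => PySem.Set.update s kv.2))
    (PySem.Dict.mk (exd.items.map (fun kv => (kv.1, PySem.Set.ofList kv.2))))) with hM
  -- per-key value agreement
  have hval : ∀ k, M.getD k PySem.Set.empty = pvV exd ind k := by
    intro k
    have hndi : (ind.items.map Prod.fst).Nodup := PySem.Dict.nodup_keys_ofList incoming
    have hM0 : (PySem.Dict.mk (exd.items.map (fun kv => (kv.1, PySem.Set.ofList kv.2)))).get? k
        = (exd.get? k).map PySem.Set.ofList := by
      have := get?_mk_map exd.items (PySem.Set.ofList (α := String)) k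
      simpa using this
    have hMk := get?_foldl_modify_update ind.items
      (PySem.Dict.mk (exd.items.map (fun kv => (kv.1, PySem.Set.ofList kv.2)))) k hndi
    rw [← hM] at hMk
    have hindget : ind.get? k = ((ind.items.find? (fun p => p.1 == k)).map Prod.snd) := rfl
    cases hf : ind.items.find? (fun p => p.1 == k) with
    | some p =>
      rw [hf] at hMk
      simp only [PySem.Dict.getD, hMk, hM0, pvV, PySem.Set.union, hindget, hf,
        Option.map_some, Option.getD_some]
      rw [set_update_ofList]
      cases he : exd.get? k with
      | none => simp [PySem.Set.ofList, PySem.Set.empty, PySem.Set.update]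
      | some w => simp [PySem.Set.ofList, PySem.Set.empty, PySem.Set.update]
    | none =>
      rw [hf] at hMk
      simp only [PySem.Dict.getD, hMk, hM0, pvV, PySem.Set.union, hindget, hf]
      cases he : exd.get? k with
      | none => simp [PySem.Set.ofList, PySem.Set.empty, PySem.Set.update]
      | some w => simp [PySem.Set.ofList, PySem.Set.empty, PySem.Set.update]
  -- key list agreement
  have hkeysM : M.keys = pvKeys exd ind := by
    have h1 : M.keys = PySem.Set.update
        (PySem.Dict.mk (exd.items.map (fun kv => (kv.1, PySem.Set.ofList kv.2)))).keys
        (ind.items.map Prod.fst) := by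
      rw [hM]
      exact PySem.Dict.keys_foldl_modify_key ind.items Prod.fst PySem.Set.empty
        (fun _ kv s => PySem.Set.update s kv.2) _
    have h2 : (PySem.Dict.mk (exd.items.map (fun kv => (kv.1, PySem.Set.ofList kv.2)))).keys
        = exd.keys := by
      simp [PySem.Dict.keys, List.map_map, Function.comp]
    have h3 : pvKeys exd ind = PySem.Set.update exd.keys ind.keys := by
      rw [pvKeys, PySem.Set.ofList_append,
        PySem.Set.ofList_eq_self_of_nodup _ (PySem.Dict.nodup_keys_ofList _)]
    rw [h1, h2, h3]
    rfl
  -- M.items is the key list mapped through pvV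
  have hitems : M.items = (pvKeys exd ind).map (fun k => (k, pvV exd ind k)) := by
    have hnd : (M.items.map Prod.fst).Nodup := by
      show M.keys.Nodup
      rw [hkeysM, pvKeys]
      exact PySem.Set.nodup_ofList _
    have := items_eq_map_keys' M.items PySem.Set.empty hnd
    rw [this]
    have hfst : M.items.map Prod.fst = pvKeys exd ind := hkeysM
    rw [hfst]
    apply List.map_congr_left
    intro k _
    exact congrArg (fun v => (k, v)) (hval k)
  rw [PySem.List.foldl_append_if (fun kv => !kv.2.isEmpty)
      (fun kv => (kv.1, PySem.List.sorted kv.2 (fun x => x))) M.items []]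
  rw [hitems, List.filter_map, List.map_map]
  rfl

-- ---------- B-side: the flattening fold ----------

theorem bStep_foldl :
    ∀ (ps : List (String × List String)) (names0 : List String) (pairs0 : List (Nat × String)),
      (ps.foldl bStep (names0, pairs0)).1 = PySem.Set.update names0 (ps.map Prod.fst)
      ∧ (ps.foldl bStep (names0, pairs0)).2
          = pairs0 ++ ps.flatMap (fun kv => kv.2.map (fun v =>
              (posIn (PySem.Set.update names0 (ps.map Prod.fst)) kv.1, v))) := by
  intro ps
  induction ps with
  | nil => intro names0 pairs0; simp [PySem.Set.update]
  | cons kv ps ih =>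
    intro names0 pairs0
    have hstable : ∀ (names : List String) (l : List String) (k : String), k ∈ names →
        posIn (PySem.Set.update names l) k = posIn names k := by
      intro names l k hk
      rw [PySem.Set.update_eq_append_filter, posIn, posIn,
        PySem.List.index?_append_of_mem _ hk]
    cases hidx : PySem.List.index? names0 kv.1 with
    | some i =>
      have hmem : kv.1 ∈ names0 := by
        have := (PySem.List.index?_isSome_iff names0 kv.1).1 (by rw [hidx]; rfl)
        exact this
      have hstep : bStep (names0, pairs0) kv
          = (names0, pairs0 ++ kv.2.map (fun v => (i, v))) := by
        simp only [bStep, hidx]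
      have hupd : PySem.Set.update names0 ((kv :: ps).map Prod.fst)
          = PySem.Set.update names0 (ps.map Prod.fst) := by
        rw [List.map_cons, PySem.Set.update_cons, PySem.Set.add_of_mem hmem]
      obtain ⟨ih1, ih2⟩ := ih names0 (pairs0 ++ kv.2.map (fun v => (i, v)))
      constructor
      · rw [List.foldl_cons, hstep, ih1, hupd]
      · rw [List.foldl_cons, hstep, ih2, hupd, List.flatMap_cons, List.append_assoc]
        congr 2
        apply List.map_congr_left
        intro v _
        have : posIn (PySem.Set.update names0 (ps.map Prod.fst)) kv.1 = i := by
          rw [hstable _ _ _ hmem, posIn, hidx]; rfl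
        rw [this]
    | none =>
      have hnmem : kv.1 ∉ names0 := (PySem.List.index?_eq_none_iff names0 kv.1).1 hidx
      have hstep : bStep (names0, pairs0) kv
          = (names0 ++ [kv.1], pairs0 ++ kv.2.map (fun v => (names0.length, v))) := by
        simp only [bStep, hidx]
      have hupd : PySem.Set.update names0 ((kv :: ps).map Prod.fst)
          = PySem.Set.update (names0 ++ [kv.1]) (ps.map Prod.fst) := by
        rw [List.map_cons, PySem.Set.update_cons, PySem.Set.add_of_not_mem hnmem]
      obtain ⟨ih1, ih2⟩ := ih (names0 ++ [kv.1]) (pairs0 ++ kv.2.map (fun v => (names0.length, v)))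
      constructor
      · rw [List.foldl_cons, hstep, ih1, hupd]
      · rw [List.foldl_cons, hstep, ih2, hupd, List.flatMap_cons, List.append_assoc]
        congr 2
        apply List.map_congr_left
        intro v _
        have hmem1 : kv.1 ∈ names0 ++ [kv.1] := by simp
        have : posIn (PySem.Set.update (names0 ++ [kv.1]) (ps.map Prod.fst)) kv.1
            = names0.length := by
          rw [hstable _ _ _ hmem1, posIn,
            PySem.List.index?_append_singleton_self names0 kv.1 hnmem]
          rfl
        rw [this]

-- ---------- B-side: the sort ----------

theorem insertBy_pairwise {α : Type} {R : α → α → Prop} {before : α → α → Bool}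
    (h1 : ∀ a b, before a b = true → R a b) (h2 : ∀ a b, before a b = false → R b a)
    (h3 : ∀ a b c, R a b → R b c → R a c) :
    ∀ (ys : List α) (x : α), ys.Pairwise R → (PySem.List.insertBy before x ys).Pairwise R := by
  intro ys
  induction ys with
  | nil => intro x _; simp [PySem.List.insertBy]
  | cons y ys ih =>
    intro x hp
    rw [List.pairwise_cons] at hp
    by_cases hb : before x y = true
    · simp only [PySem.List.insertBy, hb, if_true]
      refine List.Pairwise.cons ?_ (List.Pairwise.cons hp.1 hp.2)
      intro z hz
      rcases List.mem_cons.1 hz with rfl | hz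
      · exact h1 _ _ hb
      · exact h3 _ _ _ (h1 _ _ hb) (hp.1 z hz)
    · have hb' : before x y = false := by revert hb; cases before x y <;> simp
      simp only [PySem.List.insertBy, hb', Bool.false_eq_true, if_false]
      refine List.Pairwise.cons ?_ (ih x hp.2)
      intro z hz
      rcases (PySem.List.mem_insertBy before x z ys).1 hz with rfl | hz
      · exact h2 _ _ hb'
      · exact hp.1 z hz

-- B's pairs.sort() yields a lexicographically non-decreasing list
theorem sorted2_pairwise_lexle (xs : List (Nat × String)) :
    (PySem.List.sorted2 xs (fun p => p.1) (fun p => p.2)).Pairwise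
      (fun a b => a.1 < b.1 ∨ (a.1 = b.1 ∧ a.2 ≤ b.2)) := by
  show (List.foldl (fun acc x => PySem.List.insertBy
      (fun a b => decide (a.1 < b.1) || (!decide (b.1 < a.1) && decide (a.2 < b.2))) x acc)
      [] xs).Pairwise _
  have h1 : ∀ (a b : Nat × String),
      (decide (a.1 < b.1) || (!decide (b.1 < a.1) && decide (a.2 < b.2))) = true →
      (a.1 < b.1 ∨ (a.1 = b.1 ∧ a.2 ≤ b.2)) := by
    intro a b h
    simp only [Bool.or_eq_true, Bool.and_eq_true, Bool.not_eq_true', decide_eq_true_eq,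
      decide_eq_false_iff_not] at h
    rcases h with h | ⟨h1', h2'⟩
    · exact Or.inl h
    · rcases lt_or_eq_of_le (le_of_not_gt h1') with hlt | heq
      · exact Or.inl hlt
      · exact Or.inr ⟨heq, le_of_lt h2'⟩
  have h2 : ∀ (a b : Nat × String),
      (decide (a.1 < b.1) || (!decide (b.1 < a.1) && decide (a.2 < b.2))) = false →
      (b.1 < a.1 ∨ (b.1 = a.1 ∧ b.2 ≤ a.2)) := by
    intro a b h
    rcases lt_trichotomy a.1 b.1 with hlt | heq | hgt
    · rw [decide_eq_true hlt] at h; simp at h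
    · rw [decide_eq_false (by omega : ¬ a.1 < b.1), decide_eq_false (by omega : ¬ b.1 < a.1)] at h
      simp only [Bool.false_or, Bool.not_false, Bool.true_and] at h
      exact Or.inr ⟨heq.symm, le_of_not_gt (by simpa using h)⟩
    · exact Or.inl hgt
  have h3 : ∀ (a b c : Nat × String),
      (a.1 < b.1 ∨ (a.1 = b.1 ∧ a.2 ≤ b.2)) → (b.1 < c.1 ∨ (b.1 = c.1 ∧ b.2 ≤ c.2)) →
      (a.1 < c.1 ∨ (a.1 = c.1 ∧ a.2 ≤ c.2)) := by
    intro a b c hab hbc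
    rcases hab with hab | ⟨hab1, hab2⟩ <;> rcases hbc with hbc | ⟨hbc1, hbc2⟩
    · exact Or.inl (lt_trans hab hbc)
    · exact Or.inl (hbc1 ▸ hab)
    · exact Or.inl (hab1 ▸ hbc)
    · exact Or.inr ⟨hab1.trans hbc1, le_trans hab2 hbc2⟩
  suffices hgen : ∀ (l : List (Nat × String)) (acc : List (Nat × String)),
      acc.Pairwise (fun a b => a.1 < b.1 ∨ (a.1 = b.1 ∧ a.2 ≤ b.2)) →
      (List.foldl (fun acc x => PySem.List.insertBy
        (fun a b => decide (a.1 < b.1) || (!decide (b.1 < a.1) && decide (a.2 < b.2))) x acc)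
        acc l).Pairwise (fun a b => a.1 < b.1 ∨ (a.1 = b.1 ∧ a.2 ≤ b.2)) by
    exact hgen xs [] (by simp)
  intro l
  induction l with
  | nil => intro acc hacc; simpa using hacc
  | cons x t iht =>
    intro acc hacc
    simp only [List.foldl_cons]
    exact iht _ (insertBy_pairwise h1 h2 h3 acc x hacc)

-- grouping a list by its (covered, distinct) first components is a permutation
theorem perm_group_by_fst :
    ∀ (ks : List Nat) (l : List (Nat × String)), ks.Nodup → (∀ p ∈ l, p.1 ∈ ks) →
      (ks.flatMap (fun i => l.filter (fun p => p.1 == i))).Perm l := by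
  intro ks
  induction ks with
  | nil =>
    intro l _ hcov
    cases l with
    | nil => simp
    | cons p t => exact absurd (hcov p List.mem_cons_self) (List.not_mem_nil)
  | cons i ks ih =>
    intro l hnd hcov
    simp only [List.flatMap_cons]
    have hnd' := List.nodup_cons.1 hnd
    have hrest : ks.flatMap (fun j => l.filter (fun p => p.1 == j))
        = ks.flatMap (fun j => (l.filter (fun p => !(p.1 == i))).filter (fun p => p.1 == j)) := by
      apply List.flatMap_congr
      intro j hj
      have hji : j ≠ i := fun he => hnd'.1 (he ▸ hj)
      rw [List.filter_filter]
      apply List.filter_congr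
      intro p _
      by_cases hpj : (p.1 == j) = true
      · have hp1 : p.1 = j := by simpa using hpj
        have : (p.1 == i) = false := beq_eq_false_iff_ne.2 (hp1 ▸ hji)
        simp [hpj, this]
      · simp [hpj]
    rw [hrest]
    have ihp := ih (l.filter (fun p => !(p.1 == i))) hnd'.2 (by
      intro p hp
      rw [List.mem_filter] at hp
      rcases List.mem_cons.1 (hcov p hp.1) with h1 | h2
      · exfalso
        have hni := hp.2
        rw [h1] at hni
        simp at hni
      · exact h2)
    exact (List.Perm.append_left _ ihp).trans (List.filter_append_perm _ l)

-- the position of k in a Nodup list names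
theorem posIn_eq_iff (names : List String) (hnd : names.Nodup) (k : String) (hk : k ∈ names)
    (i : Nat) (hi : i < names.length) :
    posIn names k = i ↔ k = names.getD i "" := by
  obtain ⟨j, hj⟩ : ∃ j, PySem.List.index? names k = some j := by
    have := (PySem.List.index?_isSome_iff names k).2 hk
    cases hidx : PySem.List.index? names k with
    | none => rw [hidx] at this; cases this
    | some j => exact ⟨j, rfl⟩
  obtain ⟨hjlt, hgj, _⟩ := PySem.List.getElem_of_index?_eq_some hj
  have hgetD : names.getD i "" = names[i] := by
    rw [List.getD_eq_getElem?_getD, List.getElem?_eq_getElem hi]; rfl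
  rw [posIn, hj, hgetD]
  simp only [Option.getD_some]
  constructor
  · rintro rfl; exact hgj.symm
  · intro hki
    have : names[j] = names[i] := by rw [hgj, hki]
    exact (hnd.getElem_inj_iff).1 this

theorem flatMap_filter {α β : Type} (q : α → Bool) (g : α → List β) :
    ∀ l : List α, (l.filter q).flatMap g = l.flatMap (fun a => if q a then g a else []) := by
  intro l
  induction l with
  | nil => simp
  | cons a l ih =>
    by_cases hq : q a
    · rw [List.filter_cons_of_pos hq, List.flatMap_cons, List.flatMap_cons, if_pos hq, ih]
    · rw [List.filter_cons_of_neg (by simp [hq]), List.flatMap_cons, if_neg (by simp [hq]), ih]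
      simp

-- B's sorted pair list is the ordered concatenation of per-key sorted value groups
theorem sorted2_eq_groups (ps : List (String × List String)) (keys : List String)
    (hkeys : keys = PySem.Set.ofList (ps.map Prod.fst)) :
    PySem.List.sorted2
        (ps.flatMap (fun kv => kv.2.map (fun v => (posIn keys kv.1, v))))
        (fun p => p.1) (fun p => p.2)
      = (List.range keys.length).flatMap (fun i =>
          (PySem.List.sorted (pvVs ps (keys.getD i "")) (fun x => x)).map (fun v => (i, v))) := by
  have hknd : keys.Nodup := by rw [hkeys]; exact PySem.Set.nodup_ofList _
  set mapped := ps.flatMap (fun kv => kv.2.map (fun v => (posIn keys kv.1, v))) with hmapped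
  have hposlt : ∀ k ∈ keys, posIn keys k < keys.length := by
    intro k hk
    obtain ⟨j, hj⟩ : ∃ j, PySem.List.index? keys k = some j := by
      have := (PySem.List.index?_isSome_iff keys k).2 hk
      cases hidx : PySem.List.index? keys k with
      | none => rw [hidx] at this; cases this
      | some j => exact ⟨j, rfl⟩
    obtain ⟨hlt, _, _⟩ := PySem.List.getElem_of_index?_eq_some hj
    rw [posIn, hj]
    exact hlt
  have hmemkeys : ∀ kv ∈ ps, kv.1 ∈ keys := by
    intro kv hkv
    rw [hkeys]
    exact (PySem.Set.mem_ofList _ _).2 (List.mem_map_of_mem hkv)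
  have hcovrange : ∀ p ∈ mapped, p.1 ∈ List.range keys.length := by
    intro p hp
    rw [hmapped, List.mem_flatMap] at hp
    obtain ⟨kv, hkv, hpmem⟩ := hp
    rw [List.mem_map] at hpmem
    obtain ⟨v, _, rfl⟩ := hpmem
    rw [List.mem_range]
    exact hposlt kv.1 (hmemkeys kv hkv)
  have hgroup : ∀ i ∈ List.range keys.length,
      mapped.filter (fun p => p.1 == i) = (pvVs ps (keys.getD i "")).map (fun v => (i, v)) := by
    intro i hi
    rw [List.mem_range] at hi
    rw [hmapped, List.filter_flatMap, pvVs, List.map_flatMap, flatMap_filter]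
    apply List.flatMap_congr
    intro kv hkv
    have hkmem : kv.1 ∈ keys := hmemkeys kv hkv
    rw [List.filter_map]
    by_cases hc : posIn keys kv.1 = i
    · have hkeq : kv.1 = keys.getD i "" := (posIn_eq_iff keys hknd kv.1 hkmem i hi).1 hc
      rw [if_pos (by simpa using hkeq)]
      have hfil : kv.2.filter ((fun p => p.1 == i) ∘ (fun v => (posIn keys kv.1, v))) = kv.2 := by
        apply List.filter_eq_self.2
        intro v _
        simpa using hc
      rw [hfil]
      apply List.map_congr_left
      intro v _
      rw [hc]
    · have hkne : ¬ (kv.1 == keys.getD i "") = true := by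
        intro hb
        exact hc ((posIn_eq_iff keys hknd kv.1 hkmem i hi).2 (by simpa using hb))
      rw [if_neg hkne]
      have hfil : kv.2.filter ((fun p => p.1 == i) ∘ (fun v => (posIn keys kv.1, v))) = [] := by
        apply List.filter_eq_nil_iff.2
        intro v _
        simpa using hc
      rw [hfil, List.map_nil]
  have hperm1 : ((List.range keys.length).flatMap (fun i => mapped.filter (fun p => p.1 == i))).Perm mapped :=
    perm_group_by_fst _ _ List.nodup_range hcovrange
  have hperm : mapped.Perm ((List.range keys.length).flatMap (fun i =>
      (PySem.List.sorted (pvVs ps (keys.getD i "")) (fun x => x)).map (fun v => (i, v)))) := by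
    refine hperm1.symm.trans ?_
    apply List.Perm.flatMap (List.Perm.refl _)
    intro i hi
    rw [hgroup i hi]
    exact ((PySem.List.sorted_perm (pvVs ps (keys.getD i "")) (fun x => x) false).map _).symm
  have hpwt : ((List.range keys.length).flatMap (fun i =>
      (PySem.List.sorted (pvVs ps (keys.getD i "")) (fun x => x)).map (fun v => (i, v)))).Pairwise
      (fun a b => a.1 < b.1 ∨ (a.1 = b.1 ∧ a.2 ≤ b.2)) := by
    rw [List.pairwise_flatMap]
    constructor
    · intro i _
      rw [List.pairwise_map]
      exact (PySem.List.sorted_pairwise (pvVs ps (keys.getD i "")) (fun x => x)).imp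
        (fun hab => Or.inr ⟨rfl, hab⟩)
    · apply (List.pairwise_lt_range (n := keys.length)).imp
      intro i j hij x hx y hy
      rw [List.mem_map] at hx hy
      obtain ⟨_, _, rfl⟩ := hx
      obtain ⟨_, _, rfl⟩ := hy
      exact Or.inl hij
  refine List.Perm.eq_of_pairwise (le := fun a b => a.1 < b.1 ∨ (a.1 = b.1 ∧ a.2 ≤ b.2))
    ?_ (sorted2_pairwise_lexle mapped) hpwt ((PySem.List.sorted2_perm mapped _ _ false).trans hperm)
  intro a b _ _ hab hba
  rcases hab with h | ⟨h1, h2⟩ <;> rcases hba with h' | ⟨h1', h2'⟩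
  · exact (Nat.lt_asymm h h').elim
  · exact absurd h (by omega)
  · exact absurd h' (by omega)
  · exact Prod.ext h1 (le_antisymm h2 h2')

-- ---------- B-side: the scan ----------

theorem dict_insert_same {κ ν : Type} [BEq κ] [LawfulBEq κ] (d : PySem.Dict κ ν) (k : κ) (v : ν)
    (hnd : d.keys.Nodup) (h : d.get? k = some v) : d.insert k v = d := by
  have hc : d.contains k = true := by
    rw [PySem.Dict.contains_eq_isSome_get?, h]; rfl
  apply PySem.Dict.ext
  rw [PySem.Dict.items_insert_of_contains _ _ hc]
  conv_rhs => rw [← List.map_id d.items]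
  apply List.map_congr_left
  intro p hp
  by_cases hb : (p.1 == k) = true
  · have hk : p.1 = k := LawfulBEq.eq_of_beq hb
    have hv : d.get? p.1 = some p.2 := PySem.Dict.get?_of_mem_items d (by simpa using hp) hnd
    rw [hk, h] at hv
    simp only [hb, if_pos, id]
    exact Prod.ext (by simp [hk]) (Option.some.inj hv)
  · simp [hb]

theorem bScan_cont :
    ∀ (vs : List String) (names : List String) (i : Nat) (d : PySem.Dict String (List String))
      (acc : List String) (a : String), d.keys.Nodup →
      d.get? (names.getD i "") = some (acc ++ [a]) →
      ((vs.map (fun v => (i, v))).foldl (bScan names) d)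
        = d.insert (names.getD i "") (acc ++ List.destutter' (· ≠ ·) a vs) := by
  intro vs
  induction vs with
  | nil =>
    intro names i d acc a hnd h
    simp only [List.map_nil, List.foldl_nil, List.destutter']
    exact (dict_insert_same d _ _ hnd h).symm
  | cons v vs ih =>
    intro names i d acc a hnd h
    simp only [List.map_cons, List.foldl_cons]
    by_cases hav : a = v
    · have hstep : bScan names d (i, v) = d := by
        simp only [bScan, h, PySem.List.pyGet?_neg_one, List.getLast?_concat]
        simp [hav]
      rw [hstep, ih names i d acc a hnd h]
      have hdes : List.destutter' (· ≠ ·) a (v :: vs) = List.destutter' (· ≠ ·) a vs := by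
        simp [List.destutter', hav]
      rw [hdes]
    · have hstep : bScan names d (i, v) = d.insert (names.getD i "") ((acc ++ [a]) ++ [v]) := by
        simp only [bScan, h, PySem.List.pyGet?_neg_one, List.getLast?_concat]
        simp [hav]
      rw [hstep, ih names i _ (acc ++ [a]) v (PySem.Dict.nodup_keys_insert _ _ _ hnd)
        (PySem.Dict.get?_insert_self _ _ _), PySem.Dict.insert_insert_self]
      have hdes : List.destutter' (· ≠ ·) a (v :: vs) = a :: List.destutter' (· ≠ ·) v vs := by
        simp [List.destutter', hav]
      rw [hdes]
      simp

theorem bScan_block (names : List String) (i : Nat) (d : PySem.Dict String (List String))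
    (hnd : d.keys.Nodup) (hfresh : d.contains (names.getD i "") = false) (vs : List String) :
    ((vs.map (fun v => (i, v))).foldl (bScan names) d)
      = if vs.isEmpty then d else d.insert (names.getD i "") (vs.destutter (· ≠ ·)) := by
  cases vs with
  | nil => simp
  | cons v vs =>
    simp only [List.isEmpty_cons, Bool.false_eq_true, if_false, List.map_cons, List.foldl_cons]
    have h0 : d.get? (names.getD i "") = none :=
      (PySem.Dict.get?_eq_none_iff_contains _ _).2 hfresh
    have hstep : bScan names d (i, v) = d.insert (names.getD i "") [v] := by
      simp only [bScan, h0]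
    rw [hstep, bScan_cont vs names i _ [] v (PySem.Dict.nodup_keys_insert _ _ _ hnd)
      (by simp [PySem.Dict.get?_insert_self]), PySem.Dict.insert_insert_self]
    simp [List.destutter]

theorem bScan_blocks :
    ∀ (is : List Nat) (names : List String) (g : Nat → List String) (d : PySem.Dict String (List String)),
      d.keys.Nodup →
      (∀ i ∈ is, d.contains (names.getD i "") = false) →
      (is.map (fun i => names.getD i "")).Nodup →
      ((is.flatMap (fun i => (g i).map (fun v => (i, v)))).foldl (bScan names) d).items
        = d.items ++ (is.filter (fun i => !(g i).isEmpty)).map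
            (fun i => (names.getD i "", (g i).destutter (· ≠ ·))) := by
  intro is
  induction is with
  | nil => intro names g d _ _ _; simp
  | cons i is ih =>
    intro names g d hnd hfresh hknd
    simp only [List.flatMap_cons, List.foldl_append]
    rw [bScan_block names i d hnd (hfresh i List.mem_cons_self)]
    simp only [List.map_cons, List.nodup_cons] at hknd
    by_cases hgi : (g i).isEmpty
    · rw [if_pos hgi, ih names g d hnd (fun j hj => hfresh j (List.mem_cons_of_mem _ hj)) hknd.2]
      rw [List.filter_cons_of_neg (by simp [hgi])]
    · rw [if_neg hgi]
      set key := names.getD i "" with hkey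
      set d' := d.insert key ((g i).destutter (· ≠ ·)) with hd'
      have hitems' : d'.items = d.items ++ [(key, (g i).destutter (· ≠ ·))] :=
        PySem.Dict.items_insert_of_not_contains d _ (hfresh i List.mem_cons_self)
      have hnd' : d'.keys.Nodup := PySem.Dict.nodup_keys_insert _ _ _ hnd
      have hfresh' : ∀ j ∈ is, d'.contains (names.getD j "") = false := by
        intro j hj
        have hne : names.getD j "" ≠ key := by
          intro he
          exact hknd.1 (he ▸ List.mem_map_of_mem hj)
        rw [hd', PySem.Dict.contains_insert, Bool.or_eq_false_iff]
        exact ⟨beq_eq_false_iff_ne.2 hne, hfresh j (List.mem_cons_of_mem _ hj)⟩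
      rw [ih names g d' hnd' hfresh' hknd.2, hitems',
        List.filter_cons_of_pos (by simp [hgi]), List.map_cons, List.append_assoc]
      rfl

-- ---------- per-key value agreement ----------

theorem mem_destutter'_ne {α : Type} [DecidableEq α] :
    ∀ (l : List α) (a x : α), x ∈ a :: l → x ∈ List.destutter' (· ≠ ·) a l := by
  intro l
  induction l with
  | nil => intro a x hx; simpa [List.destutter'] using hx
  | cons b t ih =>
    intro a x hx
    by_cases hab : a ≠ b
    · simp only [List.destutter', if_pos hab]
      rcases List.mem_cons.1 hx with rfl | hx
      · exact List.mem_cons_self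
      · exact List.mem_cons_of_mem _ (ih b x hx)
    · have hab' : a = b := not_not.1 hab
      have hif : List.destutter' (fun x1 x2 : α => x1 ≠ x2) a (b :: t)
          = List.destutter' (fun x1 x2 : α => x1 ≠ x2) a t := by
        simp [List.destutter', hab']
      rw [hif]
      cases List.mem_cons.1 hx with
      | inl h1 => exact h1 ▸ ih a a List.mem_cons_self
      | inr h2 =>
        cases List.mem_cons.1 h2 with
        | inl h3 => rw [h3, ← hab']; exact ih a a List.mem_cons_self
        | inr h4 => exact ih a x (List.mem_cons_of_mem _ h4)

theorem destutter'_pairwise_lt :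
    ∀ (l : List String) (a : String), (a :: l).Pairwise (· ≤ ·) →
      (List.destutter' (· ≠ ·) a l).Pairwise (· < ·)
      ∧ ∀ x ∈ List.destutter' (· ≠ ·) a l, a ≤ x := by
  intro l
  induction l with
  | nil =>
    intro a _
    constructor
    · simp [List.destutter']
    · intro x hx; simp [List.destutter'] at hx; simp [hx]
  | cons b t ih =>
    intro a hp
    rw [List.pairwise_cons] at hp
    have hab : a ≤ b := hp.1 b List.mem_cons_self
    by_cases hne : a ≠ b
    · have halt : a < b := lt_of_le_of_ne hab hne
      obtain ⟨ihp, ihb⟩ := ih b hp.2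
      simp only [List.destutter', if_pos hne]
      constructor
      · exact List.Pairwise.cons (fun x hx => lt_of_lt_of_le halt (ihb x hx)) ihp
      · intro x hx
        rcases List.mem_cons.1 hx with rfl | hx
        · exact le_refl x
        · exact le_of_lt (lt_of_lt_of_le halt (ihb x hx))
    · have hne' : a = b := not_not.1 hne
      have hif : List.destutter' (fun x1 x2 : String => x1 ≠ x2) a (b :: t)
          = List.destutter' (fun x1 x2 : String => x1 ≠ x2) a t := by
        simp [List.destutter', hne']
      rw [hif]
      have hp' : (a :: t).Pairwise (· ≤ ·) := by
        rw [List.pairwise_cons]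
        exact ⟨fun x hx => hp.1 x (List.mem_cons_of_mem _ hx), (List.pairwise_cons.1 hp.2).2⟩
      exact ih a hp'

-- scanning a sorted run with consecutive-duplicate skipping yields sorted(set(xs))
theorem destutter_sorted_eq (xs : List String) :
    (PySem.List.sorted xs (fun x => x)).destutter (· ≠ ·)
      = PySem.List.sorted (PySem.Set.ofList xs) (fun x => x) := by
  cases hs : PySem.List.sorted xs (fun x => x) with
  | nil =>
    have hx : xs = [] := (PySem.List.sorted_eq_nil_iff xs _ false).1 hs
    subst hx
    simp [List.destutter, PySem.Set.ofList, PySem.Set.empty] at *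
    exact hs.symm
  | cons a t =>
    have hple : (a :: t).Pairwise (· ≤ ·) := by
      have := PySem.List.sorted_pairwise xs (fun x => x)
      rw [hs] at this
      exact this
    obtain ⟨hplt, _⟩ := destutter'_pairwise_lt t a hple
    rw [List.destutter]
    refine (PySem.List.sorted_eq_of_perm_of_pairwise_lt _ _ (fun x => x) ?_ hplt).symm
    rw [List.perm_ext_iff_of_nodup (hplt.imp ne_of_lt) (PySem.Set.nodup_ofList _)]
    intro x
    rw [PySem.Set.mem_ofList]
    constructor
    · intro hx
      have hsub := List.destutter_sublist (· ≠ ·) (a :: t)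
      rw [List.destutter] at hsub
      have : x ∈ a :: t := hsub.mem hx
      rw [← hs] at this
      exact (PySem.List.mem_sorted xs (fun x => x) false x).1 this
    · intro hx
      have : x ∈ PySem.List.sorted xs (fun x => x) := (PySem.List.mem_sorted xs (fun x => x) false x).2 hx
      rw [hs] at this
      exact mem_destutter'_ne t a x this

-- per-key occurrences in an association list with distinct keys = dict lookup
theorem vsOf_assoc (k : String) :
    ∀ (l : List (String × List String)), (l.map Prod.fst).Nodup →
      (l.filter (fun kv => kv.1 == k)).flatMap (fun kv => kv.2) = (PySem.Dict.mk l).getD k [] := by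
  intro l
  induction l with
  | nil => intro _; simp [PySem.Dict.getD, PySem.Dict.get?]
  | cons p rest ih =>
    intro hnd
    obtain ⟨k1, v1⟩ := p
    simp only [List.map_cons, List.nodup_cons] at hnd
    by_cases hb : (k1 == k) = true
    · have hk : k1 = k := LawfulBEq.eq_of_beq hb
      have hrest : rest.filter (fun kv => kv.1 == k) = [] := by
        rw [List.filter_eq_nil_iff]
        intro q hq hqb
        exact hnd.1 (by
          have hq1 : q.1 = k := LawfulBEq.eq_of_beq hqb
          rw [hk, ← hq1]
          exact List.mem_map_of_mem hq)
      have hfc : List.filter (fun kv => kv.1 == k) ((k1, v1) :: rest)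
          = (k1, v1) :: List.filter (fun kv => kv.1 == k) rest := by
        simp [hb]
      rw [hfc, hrest]
      simp [PySem.Dict.getD, PySem.Dict.get?_mk_cons, hb]
    · have hfc : List.filter (fun kv => kv.1 == k) ((k1, v1) :: rest)
          = List.filter (fun kv => kv.1 == k) rest := by
        simp [hb]
      rw [hfc, ih hnd.2]
      simp [PySem.Dict.getD, PySem.Dict.get?_mk_cons, hb]

theorem pvVs_eq_pvV (exd ind : PySem.Dict String (List String)) (k : String)
    (hnd1 : exd.keys.Nodup) (hnd2 : ind.keys.Nodup) :
    PySem.Set.ofList (pvVs (exd.items ++ ind.items) k) = pvV exd ind k := by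
  have hsplit : pvVs (exd.items ++ ind.items) k = exd.getD k [] ++ ind.getD k [] := by
    rw [pvVs, List.filter_append, List.flatMap_append,
      vsOf_assoc k exd.items hnd1, vsOf_assoc k ind.items hnd2]
  rw [hsplit, PySem.Set.ofList_append, pvV, PySem.Set.union, set_update_ofList]

theorem map_getD_range (K : List String) :
    (List.range K.length).map (fun i => K.getD i "") = K := by
  apply List.ext_getElem (by simp)
  intro i h1 h2
  simp [List.getD_eq_getElem?_getD, List.getElem?_eq_getElem h2]

-- B equals the same canonical filter-map over the merged key list
theorem B_eq_canon (existing : Option (List (String × List String))) (incoming : List (String × List String)) :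
    merge_identifiers_py_alt existing incoming
      = ((pvKeys (PySem.Dict.ofList (existing.getD [])) (PySem.Dict.ofList incoming)).filter
          (fun k => !(pvV (PySem.Dict.ofList (existing.getD [])) (PySem.Dict.ofList incoming) k).isEmpty)).map
          (fun k => (k, PySem.List.sorted (pvV (PySem.Dict.ofList (existing.getD [])) (PySem.Dict.ofList incoming) k) (fun x => x))) := by
  unfold merge_identifiers_py_alt
  set exd : PySem.Dict String (List String) := PySem.Dict.ofList (existing.getD []) with hexd
  set ind : PySem.Dict String (List String) := PySem.Dict.ofList incoming with hind
  set ps := exd.items ++ ind.items with hps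
  have hnd1 : exd.keys.Nodup := PySem.Dict.nodup_keys_ofList _
  have hnd2 : ind.keys.Nodup := PySem.Dict.nodup_keys_ofList _
  obtain ⟨h1, h2⟩ := bStep_foldl ps [] []
  have hpsfst : ps.map Prod.fst = exd.keys ++ ind.keys := by
    rw [hps, List.map_append]; rfl
  have hkeys2 : pvKeys exd ind = PySem.Set.ofList (ps.map Prod.fst) := by
    rw [pvKeys, hpsfst]
  set K := pvKeys exd ind with hK
  have hknd : K.Nodup := PySem.Set.nodup_ofList _
  have hkeys1 : (ps.foldl bStep ([], [])).1 = K := by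
    rw [h1, PySem.Set.update_nil_left, ← hkeys2]
  have hpairs : (ps.foldl bStep ([], [])).2
      = ps.flatMap (fun kv => kv.2.map (fun v => (posIn K kv.1, v))) := by
    rw [h2, List.nil_append, PySem.Set.update_nil_left, ← hkeys2]
  show (List.foldl (bScan (List.foldl bStep ([], []) ps).1) PySem.Dict.empty
      (PySem.List.sorted2 (List.foldl bStep ([], []) ps).2 (fun p => p.1) (fun p => p.2))).items = _
  rw [hkeys1, hpairs, sorted2_eq_groups ps K hkeys2]
  have hrangemap : (List.range K.length).map (fun i => K.getD i "") = K := map_getD_range K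
  rw [bScan_blocks (List.range K.length) K
    (fun i => PySem.List.sorted (pvVs ps (K.getD i "")) (fun x => x)) PySem.Dict.empty
    (by simp [PySem.Dict.keys_empty])
    (fun i _ => PySem.Dict.contains_empty _)
    (by rw [hrangemap]; exact hknd)]
  have hQ : ∀ k, (!(PySem.List.sorted (pvVs ps k) (fun x => x)).isEmpty)
      = (!(pvV exd ind k).isEmpty) := by
    intro k
    have ha : PySem.List.sorted (pvVs ps k) (fun x => x) = [] ↔ pvVs ps k = [] :=
      PySem.List.sorted_eq_nil_iff _ _ _
    have hb : pvV exd ind k = [] ↔ pvVs ps k = [] := by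
      rw [← pvVs_eq_pvV exd ind k hnd1 hnd2]
      exact set_ofList_eq_nil_iff _
    by_cases hnil : pvVs ps k = []
    · rw [ha.2 hnil, hb.2 hnil]
    · have ha2 : (PySem.List.sorted (pvVs ps k) (fun x => x)).isEmpty = false := by
        simp [ha, hnil]
      have hb2 : (pvV exd ind k).isEmpty = false := by
        simp [hb, hnil]
      rw [ha2, hb2]
  have hG : ∀ k, (PySem.List.sorted (pvVs ps k) (fun x => x)).destutter (· ≠ ·)
      = PySem.List.sorted (pvV exd ind k) (fun x => x) := by
    intro k
    rw [destutter_sorted_eq, pvVs_eq_pvV exd ind k hnd1 hnd2]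
  conv_rhs => rw [← hrangemap]
  rw [List.filter_map, List.map_map]
  have hQ' : (fun i => !(PySem.List.sorted (pvVs ps (K.getD i "")) (fun x => x)).isEmpty)
      = ((fun k => !(pvV exd ind k).isEmpty) ∘ (fun i => K.getD i "")) :=
    funext fun i => hQ (K.getD i "")
  have hG' : (fun i => (K.getD i "", (PySem.List.sorted (pvVs ps (K.getD i "")) (fun x => x)).destutter (· ≠ ·)))
      = ((fun k => (k, PySem.List.sorted (pvV exd ind k) (fun x => x))) ∘ (fun i => K.getD i "")) :=
    funext fun i => by
      simp only [Function.comp]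
      rw [hG (K.getD i "")]
  have hemp : (PySem.Dict.empty : PySem.Dict String (List String)).items = [] := rfl
  rw [hemp, List.nil_append, hQ', hG']

-- ===== VERDICT (by name: the statement is the Claim_ definition above) =====
theorem merge_identifiers_py_spec : Claim_equal_merge_identifiers_py := by
  intro existing incoming _
  unfold Spec_merge_identifiers_py
  rw [A_eq_canon, B_eq_canon]
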